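-- pv_equiv track=rewrite | github.com/QuadDarv1ne/maestro7it_education | c_plus_plus/solution_tasks/chess_engine/core/pawn_hash_table.py | _evaluate_king_shield
-- ===== SOURCE A (Python) =====
-- from typing import List, Dict, Optional, Tuple
--
-- def _evaluate_king_shield(board: List[List[str]],
--                          pawns: List[Tuple[int, int]], is_white: bool) -> int:
--     """Evaluate pawn shield around the king"""
--     # Find king position
--     king_char = 'K' if is_white else 'k'
--     king_pos = None
--
--     for row in range(8):
--         for col in range(8):
--             if board[row][col] == king_char:
--                 king_pos = (row, col)
--                 break
--         if king_pos:
--             break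
--
--     if not king_pos:
--         return 0
--
--     king_row, king_col = king_pos
--     shield_score = 0
--
--     # Define shield area around king
--     shield_positions = []
--     for dr in [-1, 0, 1]:
--         for dc in [-1, 0, 1]:
--             new_row = king_row + dr
--             new_col = king_col + dc
--             if 0 <= new_row < 8 and 0 <= new_col < 8:
--                 shield_positions.append((new_row, new_col))
--
--     # Count friendly pawns in shield area
--     for pawn_row, pawn_col in pawns:
--         if (pawn_row, pawn_col) in shield_positions:
--             shield_score += 1
--
--     return shield_score
-- ===== SOURCE B (Python) =====
-- def _evaluate_king_shield(board, pawns, is_white):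
--     """Evaluate pawn shield around the king"""
--     king_char = 'K' if is_white else 'k'
--     king_pos = next(((r, c) for r in range(8) for c in range(8)
--                      if board[r][c] == king_char), None)
--     if king_pos is None:
--         return 0
--     kr, kc = king_pos
--     # index the pawns once: a multiplicity table keyed by square
--     counts = {}
--     for p in pawns:
--         counts[p] = counts.get(p, 0) + 1
--     # then look up the (at most 9) shield squares in the table
--     score = 0
--     for dr in (-1, 0, 1):
--         for dc in (-1, 0, 1):
--             r, c = kr + dr, kc + dc
--             if 0 <= r < 8 and 0 <= c < 8:
--                 score += counts.get((r, c), 0)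
--     return score
-- ===== Notes on version B (the rewrite author's own statement) =====
-- stated objective: alternative
-- what changed: B inverts the counting direction: instead of A's per-pawn membership scan over a precomputed shield-square list, B builds a multiplicity dictionary over the pawns once and then sums the lookups of the at-most-9 shield squares, so the per-pawn inner scan disappears.
import Mathlib
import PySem

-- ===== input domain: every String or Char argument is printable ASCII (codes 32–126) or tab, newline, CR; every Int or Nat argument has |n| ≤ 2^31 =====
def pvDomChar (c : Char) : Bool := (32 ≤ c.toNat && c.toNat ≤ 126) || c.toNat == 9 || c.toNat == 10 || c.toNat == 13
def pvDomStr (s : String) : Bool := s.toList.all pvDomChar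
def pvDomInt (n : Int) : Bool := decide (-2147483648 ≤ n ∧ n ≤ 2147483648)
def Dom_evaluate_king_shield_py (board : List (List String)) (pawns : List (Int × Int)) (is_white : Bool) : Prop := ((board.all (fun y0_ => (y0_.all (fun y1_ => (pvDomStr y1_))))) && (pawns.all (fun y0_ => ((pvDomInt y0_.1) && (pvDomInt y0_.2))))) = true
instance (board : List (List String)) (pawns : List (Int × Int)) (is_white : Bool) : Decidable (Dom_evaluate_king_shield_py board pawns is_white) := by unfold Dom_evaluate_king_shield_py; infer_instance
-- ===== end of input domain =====

-- B inverts A's counting: it indexes the pawns in a multiplicity dictionary once and sums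
-- the lookups of the at-most-9 shield squares, instead of testing each pawn against a
-- precomputed shield-square list; objective: alternative decomposition.


-- ===== PORT A =====
-- a Python 'for … if found: break' loop: an Option accumulator that sticks once set
def pvLoopBreak {α β : Type} (l : List α) (f : α → Option β) : Option β :=
  l.foldl (fun acc x => match acc with | some p => some p | none => f x) none

-- board[row][col]; a `none` is Python's IndexError, excluded by Pre_ (the branch keeps the port total)
def pvCellA (board : List (List String)) (row col : Int) : Option String :=
  (PySem.List.pyGet? board row).bind (fun r => PySem.List.pyGet? r col)

def evaluate_king_shield_py (board : List (List String)) (pawns : List (Int × Int)) (is_white : Bool) : Int :=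
  let king_char : String := if is_white then "K" else "k"
  let king_pos : Option (Int × Int) :=
    pvLoopBreak (PySem.List.pyRange 0 8 1) (fun row =>
      pvLoopBreak (PySem.List.pyRange 0 8 1) (fun col =>
        match pvCellA board row col with
        | some cell => if cell == king_char then some (row, col) else none
        | none => none))
  match king_pos with
  | none => 0
  | some (king_row, king_col) =>
    let shield_positions : List (Int × Int) :=
      ([(-1 : Int), 0, 1]).foldl (fun acc dr =>
        ([(-1 : Int), 0, 1]).foldl (fun acc2 dc =>
          let new_row := king_row + dr
          let new_col := king_col + dc
          if 0 ≤ new_row ∧ new_row < 8 ∧ 0 ≤ new_col ∧ new_col < 8 then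
            acc2 ++ [(new_row, new_col)]
          else acc2) acc) []
    pawns.foldl (fun shield_score p =>
      if p ∈ shield_positions then shield_score + 1 else shield_score) 0

-- ===== PORT B =====
def evaluate_king_shield_py_alt (board : List (List String)) (pawns : List (Int × Int)) (is_white : Bool) : Int :=
  let king_char : String := if is_white then "K" else "k"
  -- next((...), None) over the row-major generator
  let cells : List (Int × Int) :=
    (PySem.List.pyRange 0 8 1).flatMap (fun r => (PySem.List.pyRange 0 8 1).map (fun c => (r, c)))
  match cells.find? (fun p =>
      match (PySem.List.pyGet? board p.1).bind (fun row => PySem.List.pyGet? row p.2) with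
      | some cell => cell == king_char
      | none => false) with
  | none => 0
  | some (kr, kc) =>
    -- counts[p] = counts.get(p, 0) + 1
    let counts : PySem.Dict (Int × Int) Int :=
      pawns.foldl (fun d p => d.insert p (d.getD p 0 + 1)) PySem.Dict.empty
    -- score += counts.get((r, c), 0) over the clipped 3×3 neighbourhood
    ([(-1 : Int), 0, 1]).foldl (fun acc dr =>
      ([(-1 : Int), 0, 1]).foldl (fun acc2 dc =>
        let r := kr + dr
        let c := kc + dc
        if 0 ≤ r ∧ r < 8 ∧ 0 ≤ c ∧ c < 8 then acc2 + counts.getD (r, c) 0 else acc2) acc) 0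

-- ===== PRECONDITION & SPEC =====
-- Pre_ = exactly the inputs on which Python A returns (no IndexError): either the full 8×8
-- scan prefix exists, or some king square at (r,c), r,c < 8, is reachable with every
-- earlier row-major scan position in range.
def Pre_evaluate_king_shield_py (board : List (List String)) (pawns : List (Int × Int)) (is_white : Bool) : Prop :=
  (8 ≤ board.length ∧ ∀ row ∈ board.take 8, 8 ≤ row.length) ∨
  (∃ r ∈ List.range 8, ∃ c ∈ List.range 8,
     r < board.length ∧ (∀ row ∈ board.take r, 8 ≤ row.length) ∧
     c < (board.getD r []).length ∧
     (board.getD r []).getD c "" = (if is_white then "K" else "k"))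
instance (board : List (List String)) (pawns : List (Int × Int)) (is_white : Bool) : Decidable (Pre_evaluate_king_shield_py board pawns is_white) := by unfold Pre_evaluate_king_shield_py; infer_instance

def pvWitness_evaluate_king_shield_py : List (List String) × (List (Int × Int)) × Bool :=
  ([["", "", "", "", "", "", "", ""], ["", "", "", "", "", "", "", ""],
    ["", "", "", "", "", "", "", ""], ["", "", "", "", "", "", "", ""],
    ["", "", "", "", "", "", "", ""], ["", "", "", "", "", "", "", ""],
    ["", "P", "", "", "", "", "", ""], ["", "K", "", "", "", "", "", ""]],
   [((6 : Int), (1 : Int)), ((4 : Int), (4 : Int))], true)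

def Spec_evaluate_king_shield_py (board : List (List String)) (pawns : List (Int × Int)) (is_white : Bool) (out : Int) : Prop := out = evaluate_king_shield_py_alt board pawns is_white
instance (board : List (List String)) (pawns : List (Int × Int)) (is_white : Bool) (out : Int) : Decidable (Spec_evaluate_king_shield_py board pawns is_white out) := by unfold Spec_evaluate_king_shield_py; infer_instance

-- ===== CLAIM =====
def Claim_equal_evaluate_king_shield_py : Prop := ∀ (board : List (List String)) (pawns : List (Int × Int)) (is_white : Bool), Dom_evaluate_king_shield_py board pawns is_white → Pre_evaluate_king_shield_py board pawns is_white → Spec_evaluate_king_shield_py board pawns is_white (evaluate_king_shield_py board pawns is_white)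

-- ===== LEMMAS AND PROOFS =====

-- 'pvLoopBreak' is findSome?
theorem pvLoopBreak_go {α β : Type} (f : α → Option β) :
    ∀ (l : List α) (acc : Option β),
      l.foldl (fun a x => match a with | some p => some p | none => f x) acc
        = acc.or (l.findSome? f) := by
  intro l
  induction l with
  | nil => intro acc; cases acc <;> simp [List.findSome?]
  | cons x xs ih =>
    intro acc
    cases acc with
    | some p => simp [List.foldl, ih, Option.or]
    | none =>
      simp only [List.foldl, List.findSome?_cons]
      cases hfx : f x with
      | some b => simp [ih, Option.or]
      | none => simp [ih, Option.or]

theorem pvLoopBreak_eq {α β : Type} (l : List α) (f : α → Option β) :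
    pvLoopBreak l f = l.findSome? f := by
  have h := pvLoopBreak_go f l none
  simpa [pvLoopBreak, Option.or] using h

-- findSome? of an 'if … then some (h x) else none' body is a mapped find?
theorem pv_findSome?_ifsome {α β : Type} (q : α → Bool) (h : α → β) :
    ∀ (l : List α),
      l.findSome? (fun x => if q x then some (h x) else none) = (l.find? q).map h := by
  intro l
  induction l with
  | nil => simp
  | cons x xs ih =>
    simp only [List.findSome?_cons, List.find?_cons]
    by_cases hx : q x <;> simp [hx, ih]

-- the two king scans agree: A's nested sticky loops = B's find? over the row-major product
theorem pv_king_eq (board : List (List String)) (kchar : String) :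
    pvLoopBreak (PySem.List.pyRange 0 8 1) (fun row =>
      pvLoopBreak (PySem.List.pyRange 0 8 1) (fun col =>
        match pvCellA board row col with
        | some cell => if cell == kchar then some (row, col) else none
        | none => none))
    = ((PySem.List.pyRange 0 8 1).flatMap (fun r => (PySem.List.pyRange 0 8 1).map (fun c => (r, c)))).find?
        (fun p =>
          match (PySem.List.pyGet? board p.1).bind (fun row => PySem.List.pyGet? row p.2) with
          | some cell => cell == kchar
          | none => false) := by
  rw [List.find?_flatMap]
  simp only [pvLoopBreak_eq]
  congr 1
  funext row
  rw [List.find?_map]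
  have hq : (fun col =>
        match pvCellA board row col with
        | some cell => if cell == kchar then some (row, col) else none
        | none => none)
      = (fun col => if (match pvCellA board row col with
            | some cell => cell == kchar | none => false) = true then some (row, col) else none) := by
    funext col
    cases h : pvCellA board row col with
    | none => simp
    | some cell => by_cases hc : cell == kchar <;> simp [hc]
  rw [hq, pv_findSome?_ifsome]
  rfl

-- A's shield-building loop, as filter-then-map over the 3×3 offsets
theorem pv_shield_eq (kr kc : Int) :
    ([(-1 : Int), 0, 1]).foldl (fun acc dr =>
        ([(-1 : Int), 0, 1]).foldl (fun acc2 dc =>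
          if 0 ≤ kr + dr ∧ kr + dr < 8 ∧ 0 ≤ kc + dc ∧ kc + dc < 8 then
            acc2 ++ [(kr + dr, kc + dc)]
          else acc2) acc) []
    = ([(-1 : Int), 0, 1]).flatMap (fun dr =>
        (([(-1 : Int), 0, 1]).filter (fun dc =>
            decide (0 ≤ kr + dr ∧ kr + dr < 8 ∧ 0 ≤ kc + dc ∧ kc + dc < 8))).map
          (fun dc => (kr + dr, kc + dc))) := by
  have hinner : ∀ (dr : Int) (acc2 : List (Int × Int)),
      ([(-1 : Int), 0, 1]).foldl (fun acc2 dc =>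
          if 0 ≤ kr + dr ∧ kr + dr < 8 ∧ 0 ≤ kc + dc ∧ kc + dc < 8 then
            acc2 ++ [(kr + dr, kc + dc)]
          else acc2) acc2
      = acc2 ++ (([(-1 : Int), 0, 1]).filter (fun dc =>
            decide (0 ≤ kr + dr ∧ kr + dr < 8 ∧ 0 ≤ kc + dc ∧ kc + dc < 8))).map
          (fun dc => (kr + dr, kc + dc)) := by
    intro dr acc2
    have := PySem.List.foldl_append_if
      (fun dc => decide (0 ≤ kr + dr ∧ kr + dr < 8 ∧ 0 ≤ kc + dc ∧ kc + dc < 8))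
      (fun dc => (kr + dr, kc + dc)) ([(-1 : Int), 0, 1]) acc2
    simpa using this
  simp only [hinner]
  rw [PySem.List.foldl_append_eq_flatMap, List.nil_append]

-- the shield squares are pairwise distinct
theorem pv_shield_nodup (kr kc : Int) :
    (([(-1 : Int), 0, 1]).flatMap (fun dr =>
        (([(-1 : Int), 0, 1]).filter (fun dc =>
            decide (0 ≤ kr + dr ∧ kr + dr < 8 ∧ 0 ≤ kc + dc ∧ kc + dc < 8))).map
          (fun dc => (kr + dr, kc + dc)))).Nodup := by
  rw [List.nodup_flatMap]
  constructor
  · intro dr _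
    apply List.Nodup.map
    · intro a b hab
      simpa using hab
    · exact List.Nodup.filter _ (by decide)
  · have hdisj : ∀ dr dr' : Int, dr ≠ dr' →
        List.Disjoint
          ((([(-1 : Int), 0, 1]).filter (fun dc =>
              decide (0 ≤ kr + dr ∧ kr + dr < 8 ∧ 0 ≤ kc + dc ∧ kc + dc < 8))).map
            (fun dc => (kr + dr, kc + dc)))
          ((([(-1 : Int), 0, 1]).filter (fun dc =>
              decide (0 ≤ kr + dr' ∧ kr + dr' < 8 ∧ 0 ≤ kc + dc ∧ kc + dc < 8))).map
            (fun dc => (kr + dr', kc + dc))) := by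
      intro dr dr' hne a ha hb
      simp only [List.mem_map, List.mem_filter] at ha hb
      obtain ⟨dc, _, rfl⟩ := ha
      obtain ⟨dc', _, h2⟩ := hb
      have : kr + dr' = kr + dr := congrArg Prod.fst h2
      omega
    refine List.Pairwise.cons ?_ (List.Pairwise.cons ?_ (List.Pairwise.cons ?_ List.Pairwise.nil))
    · intro a' ha'
      rcases (by simpa using ha' : a' = (0 : Int) ∨ a' = 1) with rfl | rfl
      · exact hdisj _ _ (by norm_num)
      · exact hdisj _ _ (by norm_num)
    · intro a' ha'
      have : a' = (1 : Int) := by simpa using ha'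
      subst this
      exact hdisj _ _ (by norm_num)
    · intro a' ha'
      exact absurd ha' (List.not_mem_nil)

-- sum of per-square multiplicities over a duplicate-free square list = one filtered count of the pawns
theorem pv_sum_count_eq_countP {α : Type} [BEq α] [LawfulBEq α] (S : List α) (hS : S.Nodup)
    (q : α → Bool) (hq : ∀ p, q p = true ↔ p ∈ S) :
    ∀ (ps : List α),
      (S.map (fun s => ((ps.count s : Nat) : Int))).sum = ((ps.countP q : Nat) : Int) := by
  intro ps
  induction ps with
  | nil => simp
  | cons p ps ih =>
    have hcnt : (fun s => (((p :: ps).count s : Nat) : Int))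
        = fun s => ((ps.count s : Nat) : Int) + (if p == s then 1 else 0) := by
      funext s
      rw [List.count_cons]
      by_cases hps : p == s <;> simp [hps]
    rw [hcnt, PySem.List.sum_map_add_int, ih, List.countP_cons]
    have hind : (S.map (fun s => if p == s then (1 : Int) else 0)).sum
        = if p ∈ S then 1 else 0 := by
      clear ih hcnt hq
      induction S with
      | nil => simp
      | cons s S ihS =>
        simp only [List.nodup_cons] at hS
        by_cases hp : p = s
        · subst hp
          have hz : (S.map (fun s => if p == s then (1 : Int) else 0)).sum = 0 := by
            rw [List.sum_eq_zero]
            intro x hx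
            simp only [List.mem_map] at hx
            obtain ⟨s', hs', rfl⟩ := hx
            have hne : p ≠ s' := fun h => hS.1 (h ▸ hs')
            simp [hne]
          simp [hz]
        · have := ihS hS.2
          simp [hp, this]
    rw [hind]
    by_cases hmem : p ∈ S
    · have hqp : q p = true := (hq p).mpr hmem
      simp only [hmem, if_true, hqp]
      push_cast
      ring
    · have hqp : q p = false := by
        cases hqpv : q p
        · rfl
        · exact absurd ((hq p).mp hqpv) hmem
      simp only [hmem, if_false, hqp]
      push_cast
      ring

-- B's lookup loop, as the same filtered sum of multiplicities
theorem pv_sum_map_ite {α : Type} (C : α → Bool) (g : α → Int) :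
    ∀ (l : List α), (l.map (fun x => if C x then g x else 0)).sum = ((l.filter C).map g).sum := by
  intro l
  induction l with
  | nil => simp
  | cons x xs ih => by_cases hx : C x <;> simp [hx, ih]

theorem pv_sum_flatMap {α β : Type} (f : α → List β) (h : β → Int) :
    ∀ (l : List α), ((l.flatMap f).map h).sum = (l.map (fun x => ((f x).map h).sum)).sum := by
  intro l
  induction l with
  | nil => simp
  | cons x xs ih => simp [List.flatMap_cons, ih]

-- ===== VERDICT (by name: the statement is the Claim_ definition above) =====
theorem evaluate_king_shield_py_spec : Claim_equal_evaluate_king_shield_py := by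
  intro board pawns is_white _hDom _hPre
  unfold Spec_evaluate_king_shield_py evaluate_king_shield_py evaluate_king_shield_py_alt
  dsimp only
  rw [pv_king_eq board (if is_white then "K" else "k")]
  cases hK : (((PySem.List.pyRange 0 8 1).flatMap (fun r => (PySem.List.pyRange 0 8 1).map (fun c => (r, c)))).find?
        (fun p =>
          match (PySem.List.pyGet? board p.1).bind (fun row => PySem.List.pyGet? row p.2) with
          | some cell => cell == (if is_white then "K" else "k")
          | none => false)) with
  | none => rfl
  | some kp =>
    obtain ⟨kr, kc⟩ := kp
    dsimp only
    -- A side: count of pawns inside the shield list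
    rw [pv_shield_eq kr kc]
    have hA : (fun (shield_score : Int) (p : Int × Int) =>
          if p ∈ ([(-1 : Int), 0, 1]).flatMap (fun dr =>
              (([(-1 : Int), 0, 1]).filter (fun dc =>
                  decide (0 ≤ kr + dr ∧ kr + dr < 8 ∧ 0 ≤ kc + dc ∧ kc + dc < 8))).map
                (fun dc => (kr + dr, kc + dc)))
          then shield_score + 1 else shield_score)
        = (fun shield_score p =>
          if (fun p => decide (p ∈ ([(-1 : Int), 0, 1]).flatMap (fun dr =>
              (([(-1 : Int), 0, 1]).filter (fun dc =>
                  decide (0 ≤ kr + dr ∧ kr + dr < 8 ∧ 0 ≤ kc + dc ∧ kc + dc < 8))).map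
                (fun dc => (kr + dr, kc + dc))))) p = true
          then shield_score + 1 else shield_score) := by
      funext s p
      simp only [decide_eq_true_eq]
    rw [hA, PySem.List.foldl_count_if]
    -- B side: sum of dictionary lookups over the clipped 3×3 offsets
    have hB : ∀ (acc2 : Int) (dr : Int),
        ([(-1 : Int), 0, 1]).foldl (fun acc2 dc =>
            if 0 ≤ kr + dr ∧ kr + dr < 8 ∧ 0 ≤ kc + dc ∧ kc + dc < 8 then
              acc2 + (pawns.foldl (fun d p => d.insert p (d.getD p 0 + 1)) PySem.Dict.empty).getD (kr + dr, kc + dc) 0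
            else acc2) acc2
        = acc2 + (([(-1 : Int), 0, 1]).map (fun dc =>
            if decide (0 ≤ kr + dr ∧ kr + dr < 8 ∧ 0 ≤ kc + dc ∧ kc + dc < 8) then
              ((pawns.count (kr + dr, kc + dc) : Nat) : Int)
            else 0)).sum := by
      intro acc2 dr
      have hstep : (fun (acc2 : Int) (dc : Int) =>
            if 0 ≤ kr + dr ∧ kr + dr < 8 ∧ 0 ≤ kc + dc ∧ kc + dc < 8 then
              acc2 + (pawns.foldl (fun d p => d.insert p (d.getD p 0 + 1)) PySem.Dict.empty).getD (kr + dr, kc + dc) 0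
            else acc2)
          = (fun acc2 dc => acc2 + (if decide (0 ≤ kr + dr ∧ kr + dr < 8 ∧ 0 ≤ kc + dc ∧ kc + dc < 8) then
              ((pawns.count (kr + dr, kc + dc) : Nat) : Int) else 0)) := by
        funext a dc
        rw [PySem.Dict.getD_foldl_insert_add_one]
        by_cases hc : 0 ≤ kr + dr ∧ kr + dr < 8 ∧ 0 ≤ kc + dc ∧ kc + dc < 8 <;> simp [hc]
      rw [hstep, PySem.List.foldl_add]
    simp only [hB]
    rw [PySem.List.foldl_add]
    simp only [zero_add]
    -- both sides are the filtered multiplicity sum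
    trans ((([(-1 : Int), 0, 1]).flatMap (fun dr =>
        (([(-1 : Int), 0, 1]).filter (fun dc =>
            decide (0 ≤ kr + dr ∧ kr + dr < 8 ∧ 0 ≤ kc + dc ∧ kc + dc < 8))).map
          (fun dc => (kr + dr, kc + dc)))).map (fun s => ((pawns.count s : Nat) : Int))).sum
    · exact (pv_sum_count_eq_countP _ (pv_shield_nodup kr kc) _ (fun p => by simp) pawns).symm
    · rw [pv_sum_flatMap]
      congr 1
      apply List.map_congr_left
      intro dr _
      rw [List.map_map]
      exact (pv_sum_map_ite _ _ _).symm
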